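-- pv_equiv track=rewrite | github.com/Jikky0Meoow/Manhajy_bot | storage.py | set_done_status
-- ===== SOURCE A (Python) =====
-- def normalize_text(text):
--     return " ".join((text or "").split()).strip()
--
-- def dedupe(items):
--     seen = set()
--     out = []
--     for item in items:
--         item = normalize_text(item)
--         if item and item not in seen:
--             seen.add(item)
--             out.append(item)
--     return out
--
-- def set_done_status(data, course, is_done):
--     course = normalize_text(course)
--     done = dedupe(data.get("done", []))
--
--     if not course:
--         data["done"] = done
--         return data
--
--     if is_done:
--         if course not in done:
--             done.append(course)
--     else:
--         done = [item for item in done if normalize_text(item) != course]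
--
--     data["done"] = dedupe(done)
--     return data
-- ===== SOURCE B (Python) =====
-- def normalize_text(text):
--     return " ".join((text or "").split()).strip()
--
-- def set_done_status(data, course, is_done):
--     course = normalize_text(course)
--     removing = bool(course) and not is_done
--     seen = set()
--     out = []
--     for raw in data.get("done", []):
--         item = normalize_text(raw)
--         if item and item not in seen and not (removing and item == course):
--             seen.add(item)
--             out.append(item)
--     if course and is_done and course not in seen:
--         out.append(course)
--     data["done"] = out
--     return data
-- ===== Notes on version B (the rewrite author's own statement) =====
-- stated objective: alternative
-- what changed: A's three staged passes (dedupe, then a membership-scan/list-comprehension branch, then a second dedupe) are fused into one loop over the raw entries that normalizes, dedupes and drops the removed course in a single pass, with a trailing O(1) set-membership check for the add case; the dedupe helper and both post-passes disappear.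
import Mathlib
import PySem

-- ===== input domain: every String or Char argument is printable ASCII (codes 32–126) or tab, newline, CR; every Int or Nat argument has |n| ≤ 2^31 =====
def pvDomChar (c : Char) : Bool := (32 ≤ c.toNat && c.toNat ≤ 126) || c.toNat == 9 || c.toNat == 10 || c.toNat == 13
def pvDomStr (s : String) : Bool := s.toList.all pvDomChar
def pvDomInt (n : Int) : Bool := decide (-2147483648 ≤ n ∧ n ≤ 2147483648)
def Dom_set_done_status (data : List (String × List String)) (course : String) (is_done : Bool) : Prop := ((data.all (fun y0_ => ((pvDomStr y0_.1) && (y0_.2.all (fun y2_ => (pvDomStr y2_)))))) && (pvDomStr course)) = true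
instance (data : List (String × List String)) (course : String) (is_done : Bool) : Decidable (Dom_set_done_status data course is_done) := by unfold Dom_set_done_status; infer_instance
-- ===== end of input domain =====

set_option maxHeartbeats 1000000


-- B fuses A's three staged passes (dedupe, membership/filter branch, second dedupe) into one loop
-- that normalizes, dedupes and drops the removed course in a single pass, with a trailing
-- set-membership check for the add case (objective: alternative); both versions assign
-- data['done'] in place, ported identically as the returned association list.

-- ===== PORT A =====
-- normalize_text: " ".join((text or "").split()).strip(); '(text or "")' is the identity on str input
def pyNormalize (text : String) : String :=
  PySem.Str.strip (PySem.Str.join " " (PySem.Str.split₀ text))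

-- dedupe: A's seen-set/out-list loop, state (seen, out)
def pyDedupe (items : List String) : List String :=
  (items.foldl
    (fun (st : PySem.Set String × List String) item0 =>
      let item := pyNormalize item0
      if item ≠ "" ∧ item ∉ st.1 then (st.1.add item, st.2 ++ [item]) else st)
    (PySem.Set.empty, [])).2

def set_done_status (data : List (String × List String)) (course : String) (is_done : Bool) : List (String × List String) :=
  let course := pyNormalize course
  let d := PySem.Dict.mk data
  let done := pyDedupe (d.getD "done" [])
  if course = "" then (d.insert "done" done).items
  else
    let done2 :=
      if is_done then (if course ∈ done then done else done ++ [course])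
      else done.filter (fun item => pyNormalize item ≠ course)
    (d.insert "done" (pyDedupe done2)).items

-- ===== PORT B =====
-- one fused loop over the raw entries, state (seen, out); then the trailing add-check
def bStep (c : String) (b : Bool) (st : PySem.Set String × List String) (raw : String) : PySem.Set String × List String :=
  let item := pyNormalize raw
  if item ≠ "" ∧ item ∉ st.1 ∧ ¬((c ≠ "" ∧ b = false) ∧ item = c)
  then (st.1.add item, st.2 ++ [item]) else st

def set_done_status_alt (data : List (String × List String)) (course : String) (is_done : Bool) : List (String × List String) :=
  let c := pyNormalize course
  let d := PySem.Dict.mk data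
  let st := (d.getD "done" []).foldl (bStep c is_done) (PySem.Set.empty, [])
  let out := if c ≠ "" ∧ is_done = true ∧ c ∉ st.1 then st.2 ++ [c] else st.2
  (d.insert "done" out).items

-- ===== PRECONDITION & SPEC =====
def Spec_set_done_status (data : List (String × List String)) (course : String) (is_done : Bool) (out : List (String × List String)) : Prop := out = set_done_status_alt data course is_done
instance (data : List (String × List String)) (course : String) (is_done : Bool) (out : List (String × List String)) : Decidable (Spec_set_done_status data course is_done out) := by unfold Spec_set_done_status; infer_instance

-- ===== CLAIM (what is proved, stated in full; the proofs are below) =====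
def Claim_equal_set_done_status : Prop := ∀ (data : List (String × List String)) (course : String) (is_done : Bool), Dom_set_done_status data course is_done → Spec_set_done_status data course is_done (set_done_status data course is_done)

-- ===== LEMMAS AND PROOFS =====

-- normalize_text on the character-list side
def normC (cs : List Char) : List Char :=
  PySem.Chars.strip (PySem.Chars.join [' '] (PySem.Chars.split₀ cs))

theorem toList_pyNormalize (s : String) : (pyNormalize s).toList = normC s.toList := by
  simp [pyNormalize, normC, PySem.Str.toList_strip, PySem.Str.toList_join,
    PySem.Str.split₀_map_toList]

-- a "word": nonempty, no whitespace characters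
def IsWord (w : List Char) : Prop := w ≠ [] ∧ ∀ c ∈ w, PySem.Chars.isspace c = false

theorem split₀_go_words (s : List Char) : ∀ (cur : List Char) (acc : List (List Char)),
    (∀ w ∈ acc, IsWord w) → (∀ c ∈ cur, PySem.Chars.isspace c = false) →
    ∀ w ∈ PySem.Chars.split₀.go s cur acc, IsWord w := by
  induction s with
  | nil =>
    intro cur acc hacc hcur w hw
    simp only [PySem.Chars.split₀.go] at hw
    split at hw
    · exact hacc w (by simpa using hw)
    · rename_i hne
      simp only [List.mem_reverse, List.mem_cons] at hw
      rcases hw with h | h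
      · subst h
        refine ⟨by simpa [List.isEmpty_iff] using hne, ?_⟩
        intro c hc; exact hcur c (by simpa using hc)
      · exact hacc w h
  | cons c rest ih =>
    intro cur acc hacc hcur w hw
    simp only [PySem.Chars.split₀.go] at hw
    split at hw
    · split at hw
      · exact ih [] acc hacc (by simp) w hw
      · rename_i hne
        refine ih [] _ ?_ (by simp) w hw
        intro w' hw'
        rcases List.mem_cons.mp hw' with h | h
        · subst h
          refine ⟨by simpa [List.isEmpty_iff] using hne, ?_⟩
          intro c' hc'; exact hcur c' (by simpa using hc')
        · exact hacc w' h
    · rename_i hsp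
      refine ih (c :: cur) acc hacc ?_ w hw
      intro c' hc'
      rcases List.mem_cons.mp hc' with h | h
      · subst h; simpa using hsp
      · exact hcur c' h

theorem words_split₀ (cs : List Char) : ∀ w ∈ PySem.Chars.split₀ cs, IsWord w := by
  intro w hw
  exact split₀_go_words cs [] [] (by simp) (by simp) w hw

theorem go_append_nonspace (w : List Char) (hw : ∀ c ∈ w, PySem.Chars.isspace c = false) :
    ∀ (s cur : List Char) (acc : List (List Char)),
    PySem.Chars.split₀.go (w ++ s) cur acc = PySem.Chars.split₀.go s (w.reverse ++ cur) acc := by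
  induction w with
  | nil => intro s cur acc; simp
  | cons c t ih =>
    intro s cur acc
    have hc : PySem.Chars.isspace c = false := hw c (by simp)
    simp only [List.cons_append, PySem.Chars.split₀.go, hc]
    rw [ih (fun c' hc' => hw c' (by simp [hc'])) s (c :: cur) acc]
    simp

theorem go_join (ws : List (List Char)) (h : ∀ w ∈ ws, IsWord w) : ∀ acc,
    PySem.Chars.split₀.go (PySem.Chars.join [' '] ws) [] acc = acc.reverse ++ ws := by
  induction ws with
  | nil => intro acc; simp [PySem.Chars.join_nil, PySem.Chars.split₀.go]
  | cons w rest ih =>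
    intro acc
    obtain ⟨hne, hsp⟩ := h w (by simp)
    cases rest with
    | nil =>
      rw [PySem.Chars.join_singleton]
      rw [show w = w ++ [] by simp, go_append_nonspace w hsp]
      simp only [PySem.Chars.split₀.go, List.append_nil]
      rw [if_neg (by simpa [List.isEmpty_iff] using hne)]
      simp
    | cons w' rest' =>
      rw [PySem.Chars.join_cons_cons]
      rw [List.append_assoc, go_append_nonspace w hsp]
      simp only [List.cons_append, List.nil_append, PySem.Chars.split₀.go]
      rw [if_pos (by decide)]
      rw [if_neg (by simpa [List.isEmpty_iff] using hne)]
      rw [ih (fun x hx => h x (by simp [hx]))]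
      simp

theorem split₀_join (ws : List (List Char)) (h : ∀ w ∈ ws, IsWord w) :
    PySem.Chars.split₀ (PySem.Chars.join [' '] ws) = ws := by
  show PySem.Chars.split₀.go _ [] [] = ws
  rw [go_join ws h]; simp

theorem join_head_ex (w : List Char) (rest : List (List Char)) :
    ∃ t, PySem.Chars.join [' '] (w :: rest) = w ++ t := by
  cases rest with
  | nil => exact ⟨[], by simp [PySem.Chars.join_singleton]⟩
  | cons w' rest' => exact ⟨' ' :: PySem.Chars.join [' '] (w' :: rest'), by
      rw [PySem.Chars.join_cons_cons]; simp⟩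

theorem join_ne_nil (w : List Char) (rest : List (List Char)) (hw : w ≠ []) :
    PySem.Chars.join [' '] (w :: rest) ≠ [] := by
  obtain ⟨t, ht⟩ := join_head_ex w rest
  rw [ht]; simp [hw]

theorem join_getLast? (ws : List (List Char)) (h : ∀ w ∈ ws, IsWord w) :
    ∀ c, (PySem.Chars.join [' '] ws).getLast? = some c → PySem.Chars.isspace c = false := by
  induction ws with
  | nil => intro c hc; simp [PySem.Chars.join_nil] at hc
  | cons w rest ih =>
    intro c hc
    cases rest with
    | nil =>
      rw [PySem.Chars.join_singleton] at hc
      exact (h w (by simp)).2 c (List.mem_of_getLast? hc)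
    | cons w' rest' =>
      rw [PySem.Chars.join_cons_cons, List.getLast?_append] at hc
      have hne := join_ne_nil w' rest' (h w' (by simp)).1
      obtain ⟨c', hc'⟩ := Option.isSome_iff_exists.mp (by
        rw [List.getLast?_isSome]; exact hne)
      rw [hc'] at hc
      simp only [Option.some_or] at hc
      exact ih (fun x hx => h x (by simp [hx])) c (by rw [hc', hc])

theorem lstrip_self (l : List Char) (h : ∀ c, l.head? = some c → PySem.Chars.isspace c = false) :
    PySem.Chars.lstrip l = l := by
  cases l with
  | nil => rfl
  | cons c t => simp [PySem.Chars.lstrip, h c rfl]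

theorem rstrip_self (l : List Char) (h : ∀ c, l.getLast? = some c → PySem.Chars.isspace c = false) :
    PySem.Chars.rstrip l = l := by
  rcases hr : l.reverse with _ | ⟨c, t⟩
  · have : l = [] := by simpa using congrArg List.reverse hr
    simp [this, PySem.Chars.rstrip]
  · have hc : l.getLast? = some c := by
      rw [List.getLast?_eq_head?_reverse, hr]; rfl
    rw [PySem.Chars.rstrip, hr, List.dropWhile_cons, if_neg (by simp [h c hc])]
    rw [← hr, List.reverse_reverse]

theorem strip_join (ws : List (List Char)) (h : ∀ w ∈ ws, IsWord w) :
    PySem.Chars.strip (PySem.Chars.join [' '] ws) = PySem.Chars.join [' '] ws := by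
  cases ws with
  | nil => simp [PySem.Chars.join_nil, PySem.Chars.strip, PySem.Chars.lstrip, PySem.Chars.rstrip]
  | cons w rest =>
    rw [PySem.Chars.strip]
    rw [lstrip_self _ (fun c hc => by
      obtain ⟨t, ht⟩ := join_head_ex w rest
      obtain ⟨hne, hsp⟩ := h w (by simp)
      rcases w with _ | ⟨c0, w'⟩
      · exact absurd rfl hne
      · rw [ht] at hc; simp at hc
        exact hc ▸ hsp c0 (by simp))]
    exact rstrip_self _ (join_getLast? (w :: rest) h)

theorem normC_idem (cs : List Char) : normC (normC cs) = normC cs := by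
  have hws := words_split₀ cs
  rw [show normC cs = PySem.Chars.join [' '] (PySem.Chars.split₀ cs) from by
    rw [normC, strip_join _ hws]]
  rw [normC, split₀_join _ hws, strip_join _ hws]

theorem pyNormalize_idem (s : String) : pyNormalize (pyNormalize s) = pyNormalize s := by
  apply String.toList_inj.mp
  rw [toList_pyNormalize, toList_pyNormalize, normC_idem]

-- the fused clean list, relative to an already-seen set (mirrors B's loop body);
-- crel "" true is plain normalize+dedupe (the skip clause is vacuous there)
def crel (c : String) (b : Bool) : List String → PySem.Set String → List String
  | [], _ => []
  | raw :: rest, seen =>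
    let item := pyNormalize raw
    if item ≠ "" ∧ item ∉ seen ∧ ¬((c ≠ "" ∧ b = false) ∧ item = c)
    then item :: crel c b rest (seen.add item)
    else crel c b rest seen

theorem crel_skip_false (c : String) (b : Bool) (h : c = "" ∨ b = true) (items : List String) :
    ∀ seen, crel c b items seen = crel "" true items seen := by
  induction items with
  | nil => intro seen; rfl
  | cons raw rest ih =>
    intro seen
    simp only [crel]
    have hno : ¬((c ≠ "" ∧ b = false) ∧ pyNormalize raw = c) := by
      rcases h with h | h <;> simp [h]
    by_cases hc : pyNormalize raw ≠ "" ∧ pyNormalize raw ∉ seen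
    · rw [if_pos ⟨hc.1, hc.2, hno⟩, if_pos ⟨hc.1, hc.2, by simp⟩, ih]
    · rw [if_neg (fun h' => hc ⟨h'.1, h'.2.1⟩), if_neg (fun h' => hc ⟨h'.1, h'.2.1⟩), ih]

theorem crel_mem (c : String) (b : Bool) (items : List String) :
    ∀ seen, ∀ x ∈ crel c b items seen, pyNormalize x = x ∧ x ≠ "" ∧ x ∉ seen := by
  induction items with
  | nil => intro seen x hx; simp [crel] at hx
  | cons raw rest ih =>
    intro seen x hx
    simp only [crel] at hx
    split at hx
    · rename_i hcond
      rcases List.mem_cons.mp hx with h | h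
      · subst h; exact ⟨pyNormalize_idem raw, hcond.1, hcond.2.1⟩
      · obtain ⟨h1, h2, h3⟩ := ih _ x h
        exact ⟨h1, h2, fun hm => h3 (by rw [PySem.Set.mem_add]; exact Or.inl hm)⟩
    · exact ih _ x hx

theorem crel_nodup (c : String) (b : Bool) (items : List String) :
    ∀ seen, (crel c b items seen).Nodup := by
  induction items with
  | nil => intro seen; simp [crel]
  | cons raw rest ih =>
    intro seen
    simp only [crel]
    split
    · refine List.nodup_cons.mpr ⟨fun hm => ?_, ih _⟩
      have := (crel_mem c b rest _ _ hm).2.2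
      exact this (by rw [PySem.Set.mem_add]; exact Or.inr rfl)
    · exact ih _

theorem crel_fixed (L : List String) :
    ∀ seen, (∀ x ∈ L, pyNormalize x = x ∧ x ≠ "" ∧ x ∉ seen) → L.Nodup →
    crel "" true L seen = L := by
  induction L with
  | nil => intro seen _ _; rfl
  | cons x rest ih =>
    intro seen h hnd
    obtain ⟨h1, h2, h3⟩ := h x (by simp)
    simp only [crel, h1]
    rw [if_pos ⟨h2, h3, by simp⟩]
    rw [ih (seen.add x) (fun y hy => by
      obtain ⟨g1, g2, g3⟩ := h y (by simp [hy])
      refine ⟨g1, g2, fun hm => ?_⟩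
      rcases (PySem.Set.mem_add _ _ _).mp hm with hm | hm
      · exact g3 hm
      · exact (List.nodup_cons.mp hnd).1 (hm ▸ hy)) (List.nodup_cons.mp hnd).2]

theorem crel_remove (c : String) (hc : c ≠ "") (items : List String) :
    ∀ seen seen', (∀ x, x ≠ c → (x ∈ seen ↔ x ∈ seen')) →
    crel c false items seen = (crel "" true items seen').filter (fun s => s ≠ c) := by
  induction items with
  | nil => intro seen seen' _; rfl
  | cons raw rest ih =>
    intro seen seen' hag
    simp only [crel]
    by_cases hec : pyNormalize raw = c
    · rw [if_neg (by rw [hec]; exact fun h => h.2.2 ⟨⟨hc, by simp⟩, rfl⟩)]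
      by_cases hm : pyNormalize raw ∉ seen'
      · rw [if_pos ⟨hec ▸ hc, hm, by simp⟩, List.filter_cons,
          if_neg (by simp [hec])]
        exact ih seen (seen'.add (pyNormalize raw)) (fun x hx => by
          rw [PySem.Set.mem_add]
          constructor
          · exact fun h => Or.inl ((hag x hx).mp h)
          · rintro (h | h)
            · exact (hag x hx).mpr h
            · exact absurd (h.trans hec) hx)
      · rw [if_neg (fun h => hm h.2.1)]
        exact ih seen seen' hag
    · by_cases hcond : pyNormalize raw ≠ "" ∧ pyNormalize raw ∉ seen
      · rw [if_pos ⟨hcond.1, hcond.2, fun h => hec h.2⟩,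
          if_pos ⟨hcond.1, (hag _ hec).not.mp hcond.2, by simp⟩,
          List.filter_cons, if_pos (by simp [hec])]
        rw [ih (seen.add (pyNormalize raw)) (seen'.add (pyNormalize raw)) (fun x hx => by
          rw [PySem.Set.mem_add, PySem.Set.mem_add]
          exact or_congr (hag x hx) Iff.rfl)]
      · have hm' : ¬(pyNormalize raw ≠ "" ∧ pyNormalize raw ∉ seen') := fun h =>
          hcond ⟨h.1, (hag _ hec).not.mpr h.2⟩
        rw [if_neg (fun h => hcond ⟨h.1, h.2.1⟩), if_neg (fun h => hm' ⟨h.1, h.2.1⟩)]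
        exact ih seen seen' hag

-- A's dedupe fold computes crel "" true (the same seen set drives both)
theorem afold_eq_crel (items : List String) :
    ∀ seen out, (items.foldl
      (fun (st : PySem.Set String × List String) item0 =>
        let item := pyNormalize item0
        if item ≠ "" ∧ item ∉ st.1 then (st.1.add item, st.2 ++ [item]) else st)
      (seen, out)).2 = out ++ crel "" true items seen := by
  induction items with
  | nil => intro seen out; simp [crel]
  | cons raw rest ih =>
    intro seen out
    simp only [List.foldl_cons, crel]
    by_cases hc : pyNormalize raw ≠ "" ∧ pyNormalize raw ∉ seen
    · rw [if_pos hc, if_pos ⟨hc.1, hc.2, by simp⟩, ih]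
      simp
    · rw [if_neg hc, if_neg (fun h => hc ⟨h.1, h.2.1⟩), ih]

theorem pyDedupe_eq_crel (items : List String) :
    pyDedupe items = crel "" true items PySem.Set.empty := by
  rw [pyDedupe, afold_eq_crel]; simp

-- B's fused fold computes crel c b, and its seen set is seed ∪ output
theorem bfold_eq_crel (c : String) (b : Bool) (items : List String) :
    ∀ seen out,
    ((items.foldl (bStep c b) (seen, out)).2 = out ++ crel c b items seen) ∧
    (∀ x, x ∈ (items.foldl (bStep c b) (seen, out)).1 ↔ x ∈ seen ∨ x ∈ crel c b items seen) := by
  induction items with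
  | nil => intro seen out; simp [crel]
  | cons raw rest ih =>
    intro seen out
    simp only [List.foldl_cons, crel, bStep]
    by_cases hc : pyNormalize raw ≠ "" ∧ pyNormalize raw ∉ seen ∧
        ¬((c ≠ "" ∧ b = false) ∧ pyNormalize raw = c)
    · rw [if_pos hc, if_pos hc]
      refine ⟨by rw [(ih _ _).1]; simp, fun x => ?_⟩
      rw [(ih (seen.add (pyNormalize raw)) (out ++ [pyNormalize raw])).2 x,
        PySem.Set.mem_add]
      simp only [List.mem_cons]
      exact or_assoc
    · rw [if_neg hc, if_neg hc]
      exact ⟨(ih _ _).1, (ih _ _).2⟩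

-- ===== VERDICT (by name: the statement is the Claim_ definition above) =====
theorem set_done_status_spec : Claim_equal_set_done_status := by
  intro data course is_done _
  unfold Spec_set_done_status
  simp only [set_done_status, set_done_status_alt]
  have hB := bfold_eq_crel (pyNormalize course) is_done
    ((PySem.Dict.mk data).getD "done" []) PySem.Set.empty []
  have h1 := hB.1
  have h2 := hB.2 (pyNormalize course)
  simp only [List.nil_append] at h1
  have hDmem : ∀ x ∈ crel "" true ((PySem.Dict.mk data).getD "done" []) PySem.Set.empty,
      pyNormalize x = x ∧ x ≠ "" := fun x hx =>
    ⟨(crel_mem "" true _ _ x hx).1, (crel_mem "" true _ _ x hx).2.1⟩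
  have hDnd := crel_nodup "" true ((PySem.Dict.mk data).getD "done" []) PySem.Set.empty
  by_cases hce : pyNormalize course = ""
  · rw [if_pos hce]
    rw [if_neg (by simp [hce])]
    rw [h1, crel_skip_false _ _ (Or.inl hce), pyDedupe_eq_crel]
  · rw [if_neg hce]
    cases is_done with
    | true =>
      rw [if_pos rfl]
      rw [crel_skip_false _ _ (Or.inr rfl)] at h1 h2
      have hseen : pyNormalize course ∈
          (((PySem.Dict.mk data).getD "done" []).foldl
            (bStep (pyNormalize course) true) (PySem.Set.empty, [])).1
          ↔ pyNormalize course ∈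
            crel "" true ((PySem.Dict.mk data).getD "done" []) PySem.Set.empty := by
        rw [h2]; simp [PySem.Set.empty]
      simp only [pyDedupe_eq_crel]
      by_cases hmem : pyNormalize course ∈
          crel "" true ((PySem.Dict.mk data).getD "done" []) PySem.Set.empty
      · rw [if_pos hmem, if_neg (by intro h; exact h.2.2 (hseen.mpr hmem)), h1,
          crel_fixed _ _ (fun x hx => ⟨(hDmem x hx).1, (hDmem x hx).2, by
            simp [PySem.Set.empty]⟩) hDnd]
      · rw [if_neg hmem, if_pos ⟨hce, by trivial, by intro h; exact hmem (hseen.mp h)⟩, h1,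
          crel_fixed _ _ (fun x hx => by
            rcases List.mem_append.mp hx with h | h
            · exact ⟨(hDmem x h).1, (hDmem x h).2, by simp [PySem.Set.empty]⟩
            · have hxc : x = pyNormalize course := by simpa using h
              subst hxc
              exact ⟨pyNormalize_idem course, hce, by simp [PySem.Set.empty]⟩)
          (by
            rw [List.nodup_append]
            refine ⟨hDnd, List.nodup_singleton _, ?_⟩
            intro a ha b hb hab
            exact hmem (((List.mem_singleton.mp hb) ▸ hab) ▸ ha))]
    | false =>
      rw [if_neg (by simp), if_neg (by simp)]
      rw [crel_remove _ hce _ PySem.Set.empty PySem.Set.empty (fun _ _ => Iff.rfl)] at h1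
      simp only [pyDedupe_eq_crel]
      rw [h1]
      rw [show (crel "" true ((PySem.Dict.mk data).getD "done" []) PySem.Set.empty).filter
            (fun item => pyNormalize item ≠ pyNormalize course)
          = (crel "" true ((PySem.Dict.mk data).getD "done" []) PySem.Set.empty).filter
            (fun item => item ≠ pyNormalize course) from
        List.filter_congr (fun x hx => by rw [(hDmem x hx).1])]
      rw [crel_fixed _ _ (fun x hx =>
          ⟨(hDmem x (List.mem_of_mem_filter hx)).1,
           (hDmem x (List.mem_of_mem_filter hx)).2, by simp [PySem.Set.empty]⟩)
        (hDnd.filter _)]
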